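-- pv_equiv track=rewrite | github.com/FAANG/comm-methylation | workflowbs/src/jflow/concurrent_access.py | stopRetry
-- ===== SOURCE A (Python) =====
-- def stopRetry( priorities, max_stable_priorities ):
--     """
--     @summmary: Checks the evolution of the priority along the access retries and
--                returns true if the priority does not change during last N
--                retries. This is to prevent deadlock.
--     @param priorities: [list] The priorities of each access retries.
--     @param max_stable_priorities: [int] The maximum number of retry with the
--                                   same priority.
--     @return: [bool] Returns true if the priority does not change.
--     """
--     if len(priorities) < max_stable_priorities:
--         return False
--     stop_retry = True
--     for idx in range(max_stable_priorities-1):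
--         # With max_stable_priorites = 4:
--         #     idx = 0: priorities[-1] != priorities[-2]
--         #     idx = 1: priorities[-2] != priorities[-3]
--         #     idx = 2: priorities[-3] != priorities[-4]
--         if priorities[-(1+idx)] != priorities[-(2+idx)]:
--             stop_retry = False
--     return stop_retry
-- ===== SOURCE B (Python) =====
-- def stopRetry(priorities, max_stable_priorities):
--     if len(priorities) < max_stable_priorities:
--         return False
--     window = priorities[len(priorities) - max_stable_priorities:]
--     return len(set(window)) <= 1
-- ===== Notes on version B (the rewrite author's own statement) =====
-- stated objective: simpler
-- what changed: Replaces the index loop comparing adjacent pairs through negative indexing with slicing off the last-N window (positive start index) and testing all-equal by deduplicating it with set().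
import Mathlib
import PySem

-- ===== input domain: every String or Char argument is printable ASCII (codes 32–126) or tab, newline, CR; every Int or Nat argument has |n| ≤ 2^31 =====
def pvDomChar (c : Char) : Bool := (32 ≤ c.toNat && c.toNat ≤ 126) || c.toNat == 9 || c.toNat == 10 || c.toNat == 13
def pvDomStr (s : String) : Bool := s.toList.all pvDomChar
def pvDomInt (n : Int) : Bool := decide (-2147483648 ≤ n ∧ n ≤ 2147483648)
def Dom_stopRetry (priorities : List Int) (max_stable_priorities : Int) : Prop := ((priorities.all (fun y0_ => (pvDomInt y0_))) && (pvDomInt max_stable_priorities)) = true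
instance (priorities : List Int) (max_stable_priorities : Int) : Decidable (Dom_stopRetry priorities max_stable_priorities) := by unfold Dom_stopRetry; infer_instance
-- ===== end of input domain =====

-- B replaces A's negative-index adjacent-pair loop by slicing the last-N window and testing all-equal via set deduplication (simpler, same cost).


-- ===== PORT A =====
-- the pyGetD indices are always in range under the length guard (len ≥ m > idx+1), so the total pyGetD is exact here
def stopRetry (priorities : List Int) (max_stable_priorities : Int) : Bool :=
  if (priorities.length : Int) < max_stable_priorities then false
  else
    (PySem.List.pyRange 0 (max_stable_priorities - 1)).foldl
      (fun stop_retry idx =>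
        if PySem.List.pyGetD priorities (-(1 + idx)) 0 ≠ PySem.List.pyGetD priorities (-(2 + idx)) 0
        then false else stop_retry) true

-- ===== PORT B =====
def stopRetry_alt (priorities : List Int) (max_stable_priorities : Int) : Bool :=
  if (priorities.length : Int) < max_stable_priorities then false
  else
    let window := PySem.List.slice priorities (some ((priorities.length : Int) - max_stable_priorities))
    decide ((PySem.Set.ofList window).length ≤ 1)

-- ===== PRECONDITION & SPEC =====
def Spec_stopRetry (priorities : List Int) (max_stable_priorities : Int) (out : Bool) : Prop := out = stopRetry_alt priorities max_stable_priorities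
instance (priorities : List Int) (max_stable_priorities : Int) (out : Bool) : Decidable (Spec_stopRetry priorities max_stable_priorities out) := by unfold Spec_stopRetry; infer_instance

-- ===== CLAIM (what is proved, stated in full; the proofs are below) =====
def Claim_equal_stopRetry : Prop := ∀ (priorities : List Int) (max_stable_priorities : Int), Dom_stopRetry priorities max_stable_priorities → Spec_stopRetry priorities max_stable_priorities (stopRetry priorities max_stable_priorities)

-- ===== LEMMAS AND PROOFS =====

-- A's loop keeps a flag that is cleared once a mismatch is seen: it computes `all`.
theorem foldl_flag (P : Int → Prop) [DecidablePred P] (l : List Int) (b : Bool) :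
    l.foldl (fun acc x => if P x then false else acc) b = (b && l.all (fun x => decide ¬ P x)) := by
  induction l generalizing b with
  | nil => simp
  | cons x t ih =>
    simp only [List.foldl_cons, List.all_cons, ih]
    by_cases h : P x <;> simp [h]

-- pairwise-equal lists have at most one distinct element
theorem set_len_le_one_iff (w : List Int) :
    ((PySem.Set.ofList w).length ≤ 1) ↔ (∀ x ∈ w, ∀ y ∈ w, x = y) := by
  constructor
  · intro h x hx y hy
    have hx' : x ∈ PySem.Set.ofList w := (PySem.Set.mem_ofList w x).mpr hx
    have hy' : y ∈ PySem.Set.ofList w := (PySem.Set.mem_ofList w y).mpr hy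
    match hs : PySem.Set.ofList w with
    | [] => rw [hs] at hx'; simp at hx'
    | [z] =>
      rw [hs] at hx' hy'
      simp at hx' hy'; omega
    | z1 :: z2 :: rest => rw [hs] at h; simp at h
  · intro h
    cases w with
    | nil => simp [PySem.Set.ofList]
    | cons a t =>
      have ha : a ∈ PySem.Set.ofList (a :: t) := (PySem.Set.mem_ofList _ a).mpr (by simp)
      have hnd := PySem.Set.nodup_ofList (a :: t)
      match hs : PySem.Set.ofList (a :: t) with
      | [] => rw [hs] at ha; simp at ha
      | [z] => simp
      | z1 :: z2 :: rest =>
        exfalso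
        have h1 : z1 ∈ (a :: t) := (PySem.Set.mem_ofList _ z1).mp (by rw [hs]; simp)
        have h2 : z2 ∈ (a :: t) := (PySem.Set.mem_ofList _ z2).mp (by rw [hs]; simp)
        have : z1 = z2 := (h z1 h1 z2 h2)
        rw [hs] at hnd
        simp [this] at hnd

-- adjacent equality propagates to the head …
theorem adj_to_head (w : List Int) (hadj : ∀ i : Nat, i + 1 < w.length → w[i]! = w[i+1]!) :
    ∀ i : Nat, i < w.length → w[i]! = w[0]! := by
  intro i
  induction i with
  | zero => intro _; rfl
  | succ j ih =>
    intro h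
    have := hadj j (by omega)
    rw [← this]
    exact ih (by omega)

-- … hence adjacent equality is pairwise equality
theorem adj_iff_pairwise (w : List Int) :
    (∀ i : Nat, i + 1 < w.length → w[i]! = w[i+1]!) ↔ (∀ x ∈ w, ∀ y ∈ w, x = y) := by
  constructor
  · intro hadj x hx y hy
    obtain ⟨i, hi, hxi⟩ := List.mem_iff_getElem.mp hx
    obtain ⟨j, hj, hyj⟩ := List.mem_iff_getElem.mp hy
    have hx' : w[i]! = x := by rw [getElem!_pos w i hi, hxi]
    have hy' : w[j]! = y := by rw [getElem!_pos w j hj, hyj]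
    rw [← hx', ← hy', adj_to_head w hadj i hi, adj_to_head w hadj j hj]
  · intro h i hi
    have h1 : w[i]! = w[i] := getElem!_pos w i (by omega)
    have h2 : w[i+1]! = w[i+1] := getElem!_pos w (i+1) hi
    rw [h1, h2]
    exact h _ (List.getElem_mem _) _ (List.getElem_mem _)

-- total negative indexing under the guard
theorem pyGetD_neg_nat (p : List Int) (t : Nat) (h0 : 0 < t) (hle : t ≤ p.length) :
    PySem.List.pyGetD p (-(t : Int)) 0 = p[p.length - t]! := by
  unfold PySem.List.pyGetD
  rw [PySem.List.pyGet?_neg_natCast p t h0 hle]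
  rw [List.getElem?_eq_getElem (by omega)]
  rw [getElem!_pos p _ (by omega)]
  rfl

theorem stopRetry_spec_main : ∀ (priorities : List Int) (max_stable_priorities : Int),
    stopRetry priorities max_stable_priorities = stopRetry_alt priorities max_stable_priorities := by
  intro p m
  unfold stopRetry stopRetry_alt
  by_cases hlt : (p.length : Int) < m
  · simp [hlt]
  · simp only [hlt, if_false]
    have hm : m ≤ (p.length : Int) := by omega
    -- the window B takes
    have h0 : (0:Int) ≤ (p.length : Int) - m := by omega
    rw [PySem.List.slice_from p h0]
    set k : Nat := ((p.length : Int) - m).toNat with hk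
    set w : List Int := p.drop k with hw
    have hwlen : w.length = p.length - k := by simp [hw]
    -- A's loop as an `all`
    rw [foldl_flag (fun idx => PySem.List.pyGetD p (-(1 + idx)) 0 ≠ PySem.List.pyGetD p (-(2 + idx)) 0)]
    rw [Bool.true_and]
    by_cases hA : ∀ idx ∈ PySem.List.pyRange 0 (m - 1),
        PySem.List.pyGetD p (-(1 + idx)) 0 = PySem.List.pyGetD p (-(2 + idx)) 0
    · have hall : (PySem.List.pyRange 0 (m - 1)).all
          (fun idx => decide ¬ (PySem.List.pyGetD p (-(1 + idx)) 0 ≠ PySem.List.pyGetD p (-(2 + idx)) 0)) = true := by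
        rw [List.all_eq_true]; intro idx hidx; simpa using hA idx hidx
      have hadj : ∀ i : Nat, i + 1 < w.length → w[i]! = w[i+1]! := by
        intro i hi
        -- translate to A's index j = w.length - 2 - i
        have hwl : k + w.length = p.length := by
          have : k ≤ p.length := by omega
          omega
        set j : Nat := w.length - 2 - i with hj
        have hjlt : (j : Int) < m - 1 := by
          have : (w.length : Int) = (p.length : Int) - k := by omega
          have hkm : (k : Int) = (p.length : Int) - m := by omega
          omega
        have hmem : (j : Int) ∈ PySem.List.pyRange 0 (m - 1) :=
          PySem.List.mem_pyRange_one.mpr ⟨Int.natCast_nonneg j, hjlt⟩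
        have := hA _ hmem
        rw [show (-(1 + (j:Int))) = -((j+1 : Nat) : Int) by push_cast; ring,
            show (-(2 + (j:Int))) = -((j+2 : Nat) : Int) by push_cast; ring] at this
        rw [pyGetD_neg_nat p (j+1) (by omega) (by omega),
            pyGetD_neg_nat p (j+2) (by omega) (by omega)] at this
        have e1 : p.length - (j+1) = k + (i + 1) := by omega
        have e2 : p.length - (j+2) = k + i := by omega
        rw [e1, e2] at this
        have g1 : w[i]! = p[k+i]! := by
          rw [getElem!_pos w i (by omega), getElem!_pos p (k+i) (by omega)]
          simp [hw]
        have g2 : w[i+1]! = p[k+(i+1)]! := by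
          rw [getElem!_pos w (i+1) (by omega), getElem!_pos p (k+(i+1)) (by omega)]
          simp [hw]
        rw [g1, g2, ← this]
      rw [hall]
      exact (decide_eq_true ((set_len_le_one_iff w).mpr ((adj_iff_pairwise w).mp hadj))).symm
    · -- some adjacent pair differs: both sides are false
      push Not at hA
      obtain ⟨idx, hmem, hne⟩ := hA
      have hrange := PySem.List.mem_pyRange_one.mp hmem
      have hfalse : (PySem.List.pyRange 0 (m - 1)).all
          (fun idx => decide ¬ (PySem.List.pyGetD p (-(1 + idx)) 0 ≠ PySem.List.pyGetD p (-(2 + idx)) 0)) = false := by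
        rw [List.all_eq_false]
        exact ⟨idx, hmem, by simpa using hne⟩
      rw [hfalse]
      have hwl : k + w.length = p.length := by
        have hkle : (k : Int) = (p.length : Int) - m := by omega
        have : k ≤ p.length := by omega
        omega
      have hwlenm : (w.length : Int) = m := by
        have hkle : (k : Int) = (p.length : Int) - m := by omega
        omega
      set j : Nat := idx.toNat with hj
      have hji : (j : Int) = idx := by omega
      have hadjne : ¬ (∀ i : Nat, i + 1 < w.length → w[i]! = w[i+1]!) := by
        intro hadj
        apply hne
        set i : Nat := w.length - 2 - j with hi
        have hiw : i + 1 < w.length := by omega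
        have := hadj i hiw
        rw [show (-(1 + idx)) = -((j+1 : Nat) : Int) by push_cast; omega,
            show (-(2 + idx)) = -((j+2 : Nat) : Int) by push_cast; omega]
        rw [pyGetD_neg_nat p (j+1) (by omega) (by omega),
            pyGetD_neg_nat p (j+2) (by omega) (by omega)]
        have e1 : p.length - (j+1) = k + (i + 1) := by omega
        have e2 : p.length - (j+2) = k + i := by omega
        rw [e1, e2]
        have g1 : w[i]! = p[k+i]! := by
          rw [getElem!_pos w i (by omega), getElem!_pos p (k+i) (by omega)]
          simp [hw]
        have g2 : w[i+1]! = p[k+(i+1)]! := by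
          rw [getElem!_pos w (i+1) (by omega), getElem!_pos p (k+(i+1)) (by omega)]
          simp [hw]
        rw [← g1, ← g2, this]
      exact (decide_eq_false (fun hle => hadjne ((adj_iff_pairwise w).mpr ((set_len_le_one_iff w).mp hle)))).symm

-- ===== VERDICT (by name: the statement is the Claim_ definition above) =====
theorem stopRetry_spec : Claim_equal_stopRetry := by
  intro p m _
  exact stopRetry_spec_main p m
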